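-- pv_equiv track=rewrite | github.com/daggerfall247/Chess_py | ChessMatch/movestrategies.py | isPotentialPawnMove
-- ===== SOURCE A (Python) =====
-- def isPotentialPawnMove(start, finish, ydir) -> bool:
--     '''returns true if the move is a potential pawn move'''
--     diffs = {(1,ydir), (0,ydir), (-1,ydir)}
--     if start[1] == 6 or start[1] == 1:
--         diffs.add((0,2*ydir))
--
--     for diff in diffs:
--         if start[0] + diff[0] == finish[0] and start[1] + diff[1] == finish[1]:
--             return True
--
--     return False
-- ===== SOURCE B (Python) =====
-- def isPotentialPawnMove(start, finish, ydir) -> bool: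
--     '''returns true if the move is a potential pawn move'''
--     dx = finish[0] - start[0]
--     dy = finish[1] - start[1]
--     return (dy == ydir and -1 <= dx <= 1) or \
--            (dx == 0 and dy == 2 * ydir and (start[1] == 6 or start[1] == 1))
-- ===== Notes on version B (the rewrite author's own statement) =====
-- stated objective: simpler
-- what changed: Replaces the candidate-set construction and membership-style loop with one pass-free boolean test on the move deltas dx, dy.
import Mathlib
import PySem

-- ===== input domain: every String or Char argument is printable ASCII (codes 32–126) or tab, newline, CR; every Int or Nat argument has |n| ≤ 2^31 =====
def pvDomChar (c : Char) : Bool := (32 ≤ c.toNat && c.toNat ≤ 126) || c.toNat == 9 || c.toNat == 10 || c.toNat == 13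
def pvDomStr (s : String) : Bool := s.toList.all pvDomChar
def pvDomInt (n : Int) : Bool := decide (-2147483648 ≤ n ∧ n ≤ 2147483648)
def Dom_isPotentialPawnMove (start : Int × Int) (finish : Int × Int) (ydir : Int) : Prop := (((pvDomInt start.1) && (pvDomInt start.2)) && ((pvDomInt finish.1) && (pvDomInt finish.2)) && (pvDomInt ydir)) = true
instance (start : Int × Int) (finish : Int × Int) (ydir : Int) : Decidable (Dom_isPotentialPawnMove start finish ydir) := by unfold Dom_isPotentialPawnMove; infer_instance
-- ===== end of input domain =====

-- B replaces A's candidate-set construction and loop by one boolean test on the move deltas (objective: simpler).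

-- ===== PORT A =====
-- builds the set of candidate diffs, then scans it (the scan's result is order-independent, so Set iteration is exact here)
def isPotentialPawnMove (start : Int × Int) (finish : Int × Int) (ydir : Int) : Bool :=
  let diffs : PySem.Set (Int × Int) := PySem.Set.ofList [(1, ydir), (0, ydir), (-1, ydir)]
  let diffs := if start.2 == 6 || start.2 == 1 then PySem.Set.add diffs (0, 2 * ydir) else diffs
  diffs.any (fun diff => start.1 + diff.1 == finish.1 && start.2 + diff.2 == finish.2)

-- ===== PORT B =====
def isPotentialPawnMove_alt (start : Int × Int) (finish : Int × Int) (ydir : Int) : Bool :=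
  let dx := finish.1 - start.1
  let dy := finish.2 - start.2
  (dy == ydir && (-1 ≤ dx && dx ≤ 1)) ||
    (dx == 0 && dy == 2 * ydir && (start.2 == 6 || start.2 == 1))

-- ===== PRECONDITION & SPEC =====
def Spec_isPotentialPawnMove (start : Int × Int) (finish : Int × Int) (ydir : Int) (out : Bool) : Prop := out = isPotentialPawnMove_alt start finish ydir
instance (start : Int × Int) (finish : Int × Int) (ydir : Int) (out : Bool) : Decidable (Spec_isPotentialPawnMove start finish ydir out) := by unfold Spec_isPotentialPawnMove; infer_instance

-- ===== CLAIM (what is proved, stated in full; the proofs are below) =====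
def Claim_equal_isPotentialPawnMove : Prop := ∀ (start : Int × Int) (finish : Int × Int) (ydir : Int), Dom_isPotentialPawnMove start finish ydir → Spec_isPotentialPawnMove start finish ydir (isPotentialPawnMove start finish ydir)

-- ===== LEMMAS AND PROOFS =====
theorem pawn_eq (start finish : Int × Int) (ydir : Int) :
    isPotentialPawnMove start finish ydir = isPotentialPawnMove_alt start finish ydir := by
  obtain ⟨sx, sy⟩ := start
  obtain ⟨fx, fy⟩ := finish
  rw [Bool.eq_iff_iff]
  unfold isPotentialPawnMove isPotentialPawnMove_alt
  by_cases h0 : ydir = 0 <;> by_cases h6 : sy = 6 <;> by_cases h1 : sy = 1 <;>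
    simp [PySem.Set.ofList, PySem.Set.add, PySem.Set.contains, h0, h6, h1] <;> omega

-- ===== VERDICT (by name: the statement is the Claim_ definition above) =====
theorem isPotentialPawnMove_spec : Claim_equal_isPotentialPawnMove := by
  intro start finish ydir _
  exact pawn_eq start finish ydir
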